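-- pv_equiv track=rewrite | github.com/moonie0201/flash-moe-cuda | ses/src/confidence.py | ses_calculate_hit_rate
-- ===== SOURCE A (Python) =====
-- def ses_calculate_hit_rate(predicted_full: list, predicted_base: list,
--                            actual: list) -> dict:
--     """Calculate hit rate for SES prediction.
--
--     Returns:
--         dict with full_hits, base_hits, misses
--     """
--     full_set = set(predicted_full)
--     base_set = set(predicted_base)
--
--     full_hits = 0
--     base_hits = 0
--     misses = 0
--
--     for eid in actual:
--         if eid in full_set:
--             full_hits += 1
--         elif eid in base_set:
--             base_hits += 1
--         else:
--             misses += 1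
--
--     return {
--         'full_hits': full_hits,
--         'base_hits': base_hits,
--         'misses': misses,
--     }
-- ===== SOURCE B (Python) =====
-- def ses_calculate_hit_rate(predicted_full: list, predicted_base: list,
--                            actual: list) -> dict:
--     """Calculate hit rate for SES prediction via a frequency table of actual."""
--     freq = {}
--     for e in actual:
--         freq[e] = freq.get(e, 0) + 1
--     full_set = set(predicted_full)
--     base_set = set(predicted_base)
--     full_hits = sum(c for e, c in freq.items() if e in full_set)
--     base_hits = sum(c for e, c in freq.items()
--                     if e in base_set and e not in full_set)
--     misses = len(actual) - full_hits - base_hits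
--     return {
--         'full_hits': full_hits,
--         'base_hits': base_hits,
--         'misses': misses,
--     }
-- ===== Notes on version B (the rewrite author's own statement) =====
-- stated objective: alternative
-- what changed: B builds a frequency table of actual once and computes full_hits/base_hits as sums of counts over the distinct keys (full-set priority kept via an explicit not-in-full guard), with misses derived as len(actual) minus the two hit counts, instead of A's per-element three-way branch loop.
import Mathlib
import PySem

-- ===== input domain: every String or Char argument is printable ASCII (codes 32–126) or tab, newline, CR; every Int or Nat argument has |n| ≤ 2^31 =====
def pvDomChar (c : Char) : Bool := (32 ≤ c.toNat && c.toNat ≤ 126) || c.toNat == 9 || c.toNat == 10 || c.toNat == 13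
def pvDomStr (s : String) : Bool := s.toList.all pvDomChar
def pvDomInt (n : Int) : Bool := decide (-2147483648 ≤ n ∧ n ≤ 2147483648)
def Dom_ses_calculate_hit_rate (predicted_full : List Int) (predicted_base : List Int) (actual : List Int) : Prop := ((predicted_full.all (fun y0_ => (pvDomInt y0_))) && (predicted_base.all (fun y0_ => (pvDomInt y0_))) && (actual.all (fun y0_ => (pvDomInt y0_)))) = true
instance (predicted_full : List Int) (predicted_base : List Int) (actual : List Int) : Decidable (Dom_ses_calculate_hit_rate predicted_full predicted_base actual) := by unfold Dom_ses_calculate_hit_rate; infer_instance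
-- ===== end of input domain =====

-- B replaces A's per-element three-way branch loop by a frequency table of `actual`
-- summed over distinct keys (alternative decomposition; same asymptotic cost).

-- ===== PORT A =====
def ses_calculate_hit_rate (predicted_full : List Int) (predicted_base : List Int) (actual : List Int) : List (String × Int) :=
  let full_set : PySem.Set Int := PySem.Set.ofList predicted_full
  let base_set : PySem.Set Int := PySem.Set.ofList predicted_base
  let r : Int × Int × Int := actual.foldl (fun (s : Int × Int × Int) eid =>
      if PySem.Set.contains full_set eid then (s.1 + 1, s.2.1, s.2.2)
      else if PySem.Set.contains base_set eid then (s.1, s.2.1 + 1, s.2.2)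
      else (s.1, s.2.1, s.2.2 + 1)) (0, 0, 0)
  [("full_hits", r.1), ("base_hits", r.2.1), ("misses", r.2.2)]

-- ===== PORT B =====
def ses_calculate_hit_rate_alt (predicted_full : List Int) (predicted_base : List Int) (actual : List Int) : List (String × Int) :=
  -- freq = {}; for e in actual: freq[e] = freq.get(e, 0) + 1
  let freq : PySem.Dict Int Int := actual.foldl (fun d e => d.insert e (d.getD e 0 + 1)) PySem.Dict.empty
  let full_set : PySem.Set Int := PySem.Set.ofList predicted_full
  let base_set : PySem.Set Int := PySem.Set.ofList predicted_base
  let full_hits : Int := ((freq.items.filter (fun p => PySem.Set.contains full_set p.1)).map (·.2)).sum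
  let base_hits : Int := ((freq.items.filter (fun p => PySem.Set.contains base_set p.1 && !PySem.Set.contains full_set p.1)).map (·.2)).sum
  let misses : Int := (actual.length : Int) - full_hits - base_hits
  [("full_hits", full_hits), ("base_hits", base_hits), ("misses", misses)]

-- ===== PRECONDITION & SPEC =====
def Spec_ses_calculate_hit_rate (predicted_full : List Int) (predicted_base : List Int) (actual : List Int) (out : List (String × Int)) : Prop := out = ses_calculate_hit_rate_alt predicted_full predicted_base actual
instance (predicted_full : List Int) (predicted_base : List Int) (actual : List Int) (out : List (String × Int)) : Decidable (Spec_ses_calculate_hit_rate predicted_full predicted_base actual out) := by unfold Spec_ses_calculate_hit_rate; infer_instance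

-- ===== CLAIM (what is proved, stated in full; the proofs are below) =====
def Claim_equal_ses_calculate_hit_rate : Prop := ∀ (predicted_full : List Int) (predicted_base : List Int) (actual : List Int), Dom_ses_calculate_hit_rate predicted_full predicted_base actual → Spec_ses_calculate_hit_rate predicted_full predicted_base actual (ses_calculate_hit_rate predicted_full predicted_base actual)

-- ===== LEMMAS AND PROOFS =====

-- A's three-accumulator loop computes the three countP's.
theorem loopA_eq_countP (p q : Int → Bool) (l : List Int) (a b c : Int) :
    l.foldl (fun (s : Int × Int × Int) eid =>
      if p eid then (s.1 + 1, s.2.1, s.2.2)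
      else if q eid then (s.1, s.2.1 + 1, s.2.2)
      else (s.1, s.2.1, s.2.2 + 1)) (a, b, c)
    = (a + (l.countP p : Int),
       b + (l.countP (fun e => !p e && q e) : Int),
       c + (l.countP (fun e => !p e && !q e) : Int)) := by
  induction l generalizing a b c with
  | nil => simp
  | cons x t ih =>
    simp only [List.foldl_cons, List.countP_cons]
    by_cases hp : p x
    · simp [hp, ih]; ring_nf
    · by_cases hq : q x
      · simp [hp, hq, ih]; omega
      · simp [hp, hq, ih]; omega

-- PySem's first-occurrence dedup is a permutation of Mathlib's dedup.
theorem pydedup_perm_dedup [DecidableEq α] (l : List α) :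
    (PySem.List.dedup l).Perm l.dedup := by
  apply List.perm_of_nodup_nodup_toFinset_eq (PySem.List.nodup_dedup l) l.nodup_dedup
  ext x
  simp [List.mem_toFinset, List.mem_dedup]

-- Summing counts over the distinct keys satisfying p = countP p (Int form).
theorem sum_counts_set_eq_countP (p : Int → Bool) (l : List Int) :
    (((PySem.Set.ofList l).filter p).map (fun k => (l.count k : Int))).sum
      = (l.countP p : Int) := by
  have hperm : (((PySem.Set.ofList l).filter p).map (fun k => (l.count k : Int))).Perm
      ((l.dedup.filter p).map (fun k => (l.count k : Int))) := by
    apply List.Perm.map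
    apply List.Perm.filter
    have : (PySem.Set.ofList l : List Int) = PySem.List.dedup l := by
      simp [PySem.List.dedup_eq_ofList]
    rw [this]
    exact pydedup_perm_dedup l
  rw [hperm.sum_eq]
  have hcast : ∀ (s : List Int), (s.map (fun k => (l.count k : Int))).sum
      = (((s.map (fun k => l.count k)).sum : Nat) : Int) := by
    intro s
    induction s with
    | nil => simp
    | cons x t ih => simp [ih]
  rw [hcast (l.dedup.filter p), List.sum_map_count_dedup_filter_eq_countP]

-- countP of the three disjoint classes sums to the length.
theorem countP_three_split (p q : Int → Bool) (l : List Int) :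
    l.countP p + l.countP (fun e => !p e && q e) + l.countP (fun e => !p e && !q e) = l.length := by
  induction l with
  | nil => simp
  | cons x t ih =>
    simp only [List.countP_cons, List.length_cons]
    by_cases hp : p x <;> by_cases hq : q x <;> simp [hp, hq] <;> omega

-- B's items sums in terms of countP.
theorem alt_sum_eq (l : List Int) (pr : Int → Bool) :
    ((((l.foldl (fun d e => d.insert e (d.getD e 0 + 1)) PySem.Dict.empty : PySem.Dict Int Int)).items.filter
        (fun p => pr p.1)).map (·.2)).sum = (l.countP pr : Int) := by
  rw [PySem.Dict.foldl_insert_getD_add_one_eq_counter, PySem.Dict.items_counter]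
  simp only [List.filter_map, List.map_map, Function.comp_def]
  simpa using sum_counts_set_eq_countP pr l

-- ===== VERDICT (by name: the statement is the Claim_ definition above) =====
theorem ses_calculate_hit_rate_spec : Claim_equal_ses_calculate_hit_rate := by
  intro pf pb act _
  unfold Spec_ses_calculate_hit_rate ses_calculate_hit_rate ses_calculate_hit_rate_alt
  simp only []
  rw [loopA_eq_countP]
  rw [alt_sum_eq act (fun e => PySem.Set.contains (PySem.Set.ofList pf) e)]
  rw [alt_sum_eq act (fun e => PySem.Set.contains (PySem.Set.ofList pb) e && !PySem.Set.contains (PySem.Set.ofList pf) e)]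
  have hb : act.countP (fun e => PySem.Set.contains (PySem.Set.ofList pb) e && !PySem.Set.contains (PySem.Set.ofList pf) e)
      = act.countP (fun e => !PySem.Set.contains (PySem.Set.ofList pf) e && PySem.Set.contains (PySem.Set.ofList pb) e) := by
    apply List.countP_congr
    intro x _
    simp [Bool.and_comm]
  rw [hb]
  have h3 := countP_three_split (fun e => PySem.Set.contains (PySem.Set.ofList pf) e)
      (fun e => PySem.Set.contains (PySem.Set.ofList pb) e) act
  simp only [Int.zero_add]
  refine congrArg₂ _ rfl (congrArg₂ _ rfl (congrArg₂ _ ?_ rfl))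
  refine congrArg _ ?_
  omega
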